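-- pv_equiv track=rewrite | github.com/incerto-crypto/solitude | solitude/debugger/evm_trace.py | _decode_source_map
-- ===== SOURCE A (Python) =====
-- from typing import List, Dict, Tuple, Optional, Iterator, Sequence
--
-- def _decode_source_map(srcmap: str) -> List[Tuple[int, int, int, str]]:
--     out = []
--     # the source map is a list of tuples (st, le, fi, ju)
--     #   st: start character in source code
--     #   le: lenght of code portion
--     #   fi: file number for this mapping
--     #   ju: jump type
--
--     # In the string, mappings are separated by ";" and elements of a mapping
--     #   are separated by ":"
--
--     # from https://github.com/ethereum/solidity/blob/develop/docs/miscellaneous.rst#source-mappings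
--     # In order to compress these source mappings especially for bytecode, the following rules are used:
--     #   - If a field is empty, the value of the preceding element is used.
--     #   - If a : is missing, all following fields are considered empty.
--
--     last = (0, 0, 0, '-')
--     for m in srcmap.split(";"):
--         mv = m.split(':')
--         st = int(mv[0]) if (len(mv) > 0 and len(mv[0])) else last[0]
--         le = int(mv[1]) if (len(mv) > 1 and len(mv[1])) else last[1]
--         fi = int(mv[2]) if (len(mv) > 2 and len(mv[2])) else last[2]
--         ju = mv[3] if (len(mv) > 3 and len(mv[3])) else last[3]
--         last = (st, le, fi, ju)
--         out.append(last)
--     return out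
-- ===== SOURCE B (Python) =====
-- from typing import List, Tuple
--
-- def _decode_source_map(srcmap: str) -> List[Tuple[int, int, int, str]]:
--     # Column-wise decoding: each of the four fields forward-fills independently,
--     # so build each column in its own pass, then zip the columns into rows.
--     mvs = [m.split(':') for m in srcmap.split(';')]
--
--     def column(i, default, conv):
--         cur = default
--         col = []
--         for mv in mvs:
--             if len(mv) > i and mv[i]:
--                 cur = conv(mv[i])
--             col.append(cur)
--         return col
--
--     st = column(0, 0, int)
--     le = column(1, 0, int)
--     fi = column(2, 0, int)
--     ju = column(3, '-', str)
--     return list(zip(st, le, fi, ju))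
-- ===== Notes on version B (the rewrite author's own statement) =====
-- stated objective: alternative
-- what changed: Replaces A's single row-wise loop carrying the previous 4-tuple with four independent forward-fill column passes (one per field) that are zipped into the output rows; Pre_ excludes only inputs where int() raises ValueError (a present non-empty st/le/fi field that is not an int literal), on which B raises identically.
import Mathlib
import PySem

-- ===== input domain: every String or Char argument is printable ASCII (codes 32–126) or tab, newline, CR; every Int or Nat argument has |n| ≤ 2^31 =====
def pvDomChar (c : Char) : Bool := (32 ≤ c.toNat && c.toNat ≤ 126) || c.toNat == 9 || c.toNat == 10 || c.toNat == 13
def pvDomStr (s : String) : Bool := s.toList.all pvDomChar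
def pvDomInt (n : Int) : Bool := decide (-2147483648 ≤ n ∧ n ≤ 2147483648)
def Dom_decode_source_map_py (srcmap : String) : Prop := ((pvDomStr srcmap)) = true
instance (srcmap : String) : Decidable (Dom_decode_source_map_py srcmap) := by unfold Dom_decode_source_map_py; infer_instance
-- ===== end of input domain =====

-- B decodes the compressed source map column-by-column (four independent forward-fill
-- passes, zipped into rows) instead of A's single row-wise loop carrying a 4-tuple;
-- objective: alternative decomposition, same cost.

-- ===== PORT A =====
-- row-wise loop; `last` is the carried tuple, int(s) is PySem.Int.ofStr? (Pre_ excludes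
-- inputs where int() raises, so the .getD 0 default is never claimed about)
def pvDecodeLoopA (last : Int × Int × Int × String) : List String → List (Int × Int × Int × String)
  | [] => []
  | m :: ms =>
    let mv := ((PySem.Str.split? m ":").getD [])
    let st : Int := match mv[0]? with
      | some s => if s ≠ "" then (PySem.Int.ofStr? s).getD 0 else last.1
      | none => last.1
    let le : Int := match mv[1]? with
      | some s => if s ≠ "" then (PySem.Int.ofStr? s).getD 0 else last.2.1
      | none => last.2.1
    let fi : Int := match mv[2]? with
      | some s => if s ≠ "" then (PySem.Int.ofStr? s).getD 0 else last.2.2.1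
      | none => last.2.2.1
    let ju : String := match mv[3]? with
      | some s => if s ≠ "" then s else last.2.2.2
      | none => last.2.2.2
    (st, le, fi, ju) :: pvDecodeLoopA (st, le, fi, ju) ms

def decode_source_map_py (srcmap : String) : List (Int × Int × Int × String) :=
  pvDecodeLoopA (0, 0, 0, "-") (((PySem.Str.split? srcmap ";").getD []))

-- ===== PORT B =====
-- one forward-filled column per field
def pvColInt (i : Nat) (cur : Int) : List (List String) → List Int
  | [] => []
  | mv :: rest =>
    let c : Int := match mv[i]? with
      | some s => if s ≠ "" then (PySem.Int.ofStr? s).getD 0 else cur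
      | none => cur
    c :: pvColInt i c rest

def pvColStr (cur : String) : List (List String) → List String
  | [] => []
  | mv :: rest =>
    let c : String := match mv[3]? with
      | some s => if s ≠ "" then s else cur
      | none => cur
    c :: pvColStr c rest

def decode_source_map_py_alt (srcmap : String) : List (Int × Int × Int × String) :=
  let mvs := (((PySem.Str.split? srcmap ";").getD [])).map (fun m => ((PySem.Str.split? m ":").getD []))
  (pvColInt 0 0 mvs).zip ((pvColInt 1 0 mvs).zip ((pvColInt 2 0 mvs).zip (pvColStr "-" mvs)))

-- ===== PRECONDITION & SPEC =====
-- Pre_ excludes exactly the inputs on which A raises ValueError: some present, non-empty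
-- st/le/fi field is not a valid Python int literal.
def pvIntFieldOK (mv : List String) (i : Nat) : Bool :=
  match mv[i]? with
  | some s => s == "" || (PySem.Int.ofStr? s).isSome
  | none => true

def Pre_decode_source_map_py (srcmap : String) : Prop :=
  ∀ m ∈ ((PySem.Str.split? srcmap ";").getD []),
    pvIntFieldOK (((PySem.Str.split? m ":").getD [])) 0 = true ∧
    pvIntFieldOK (((PySem.Str.split? m ":").getD [])) 1 = true ∧
    pvIntFieldOK (((PySem.Str.split? m ":").getD [])) 2 = true
instance (srcmap : String) : Decidable (Pre_decode_source_map_py srcmap) := by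
  unfold Pre_decode_source_map_py; infer_instance

def pvWitness_decode_source_map_py : String := "1:2:3:o;:::;-4;;5:6"

def Spec_decode_source_map_py (srcmap : String) (out : List (Int × Int × Int × String)) : Prop := out = decode_source_map_py_alt srcmap
instance (srcmap : String) (out : List (Int × Int × Int × String)) : Decidable (Spec_decode_source_map_py srcmap out) := by unfold Spec_decode_source_map_py; infer_instance

-- ===== CLAIM (what is proved, stated in full; the proofs are below) =====
def Claim_equal_decode_source_map_py : Prop := ∀ (srcmap : String), Dom_decode_source_map_py srcmap → Pre_decode_source_map_py srcmap → Spec_decode_source_map_py srcmap (decode_source_map_py srcmap)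

-- ===== LEMMAS AND PROOFS =====
-- the row-wise loop equals the zip of the four forward-filled columns, for any carry
theorem pvLoop_eq_zip (ms : List String) :
    ∀ (st le fi : Int) (ju : String),
      pvDecodeLoopA (st, le, fi, ju) ms =
        (pvColInt 0 st (ms.map (fun m => ((PySem.Str.split? m ":").getD [])))).zip
          ((pvColInt 1 le (ms.map (fun m => ((PySem.Str.split? m ":").getD [])))).zip
            ((pvColInt 2 fi (ms.map (fun m => ((PySem.Str.split? m ":").getD [])))).zip
              (pvColStr ju (ms.map (fun m => ((PySem.Str.split? m ":").getD [])))))) := by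
  induction ms with
  | nil => intro st le fi ju; rfl
  | cons m ms ih =>
    intro st le fi ju
    simp only [pvDecodeLoopA, List.map_cons, pvColInt, pvColStr, List.zip_cons_cons]
    rw [ih]

theorem decode_source_map_py_witness_ok :
    Dom_decode_source_map_py pvWitness_decode_source_map_py ∧
      Pre_decode_source_map_py pvWitness_decode_source_map_py := by decide

-- ===== VERDICT (by name: the statement is the Claim_ definition above) =====
theorem decode_source_map_py_spec : Claim_equal_decode_source_map_py := by
  intro srcmap _ _
  unfold Spec_decode_source_map_py decode_source_map_py decode_source_map_py_alt
  exact pvLoop_eq_zip _ 0 0 0 "-"
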